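-- pv_equiv track=rewrite | github.com/Joao-Quinta/master_1 | information_system_security/TP1/AES_2.0.py | byte_shift_4_4_matrix
-- ===== SOURCE A (Python) =====
-- def rotation(liste_bits):  # VERIFIED
--     liste_copy = liste_bits.copy()
--     return liste_copy[1:] + liste_copy[:1]
--
-- def byte_shift_4_4_matrix(m):
--     res_array = []
--     for i in range(len(m)):
--         arr = m[i]
--         for j in range(i):
--             arr = rotation(arr)
--         res_array.append(arr)
--     return res_array
-- ===== SOURCE B (Python) =====
-- def byte_shift_4_4_matrix(m):
--     return [[row[(j + i) % len(row)] for j in range(len(row))]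
--             for i, row in enumerate(m)]
-- ===== Notes on version B (the rewrite author's own statement) =====
-- stated objective: faster
-- what changed: Replaces the per-row loop of repeated one-step rotations with a single nested comprehension that gathers each output element directly via the modular index map row[(j+i) % len(row)].
import Mathlib
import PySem

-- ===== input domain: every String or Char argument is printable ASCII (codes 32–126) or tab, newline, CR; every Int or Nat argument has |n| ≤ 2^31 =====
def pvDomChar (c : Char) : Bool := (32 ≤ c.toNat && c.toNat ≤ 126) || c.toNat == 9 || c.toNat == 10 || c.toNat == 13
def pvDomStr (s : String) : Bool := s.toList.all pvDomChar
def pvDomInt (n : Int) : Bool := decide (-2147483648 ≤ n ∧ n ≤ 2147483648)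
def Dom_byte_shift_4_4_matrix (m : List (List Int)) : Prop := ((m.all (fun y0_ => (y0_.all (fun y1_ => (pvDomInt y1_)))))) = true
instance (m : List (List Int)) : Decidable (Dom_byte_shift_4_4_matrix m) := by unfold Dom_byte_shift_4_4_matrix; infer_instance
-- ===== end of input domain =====

-- B replaces A's repeated one-step rotations per row by a direct modular-index gather; faster on large matrices.

-- ===== PORT A =====
def pvRotation (l : List Int) : List Int :=
  PySem.List.slice l (some 1) none ++ PySem.List.slice l none (some 1)

def byte_shift_4_4_matrix (m : List (List Int)) : List (List Int) :=
  (PySem.List.pyRange 0 m.length 1).foldl (fun res i =>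
    res ++ [(PySem.List.pyRange 0 i 1).foldl (fun arr _ => pvRotation arr)
              (PySem.List.pyGetD m i [])]) []

-- ===== PORT B =====
def byte_shift_4_4_matrix_alt (m : List (List Int)) : List (List Int) :=
  (PySem.List.enumerate m 0).map (fun p =>
    (PySem.List.pyRange 0 p.2.length 1).map (fun j =>
      PySem.List.pyGetD p.2 (PySem.Int.mod (j + p.1) p.2.length) 0))

-- ===== PRECONDITION & SPEC =====
def Spec_byte_shift_4_4_matrix (m : List (List Int)) (out : List (List Int)) : Prop := out = byte_shift_4_4_matrix_alt m
instance (m : List (List Int)) (out : List (List Int)) : Decidable (Spec_byte_shift_4_4_matrix m out) := by unfold Spec_byte_shift_4_4_matrix; infer_instance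

-- ===== CLAIM (what is proved, stated in full; the proofs are below) =====
def Claim_equal_byte_shift_4_4_matrix : Prop := ∀ (m : List (List Int)), Dom_byte_shift_4_4_matrix m → Spec_byte_shift_4_4_matrix m (byte_shift_4_4_matrix m)

-- ===== LEMMAS AND PROOFS =====

theorem pvRotation_eq_rotate (l : List Int) : pvRotation l = l.rotate 1 := by
  cases l with
  | nil => rfl
  | cons x xs =>
    rw [pvRotation, PySem.List.slice_from _ (by norm_num : (0:Int) ≤ 1),
      PySem.List.slice_to _ (by norm_num : (0:Int) ≤ 1),
      List.rotate_eq_drop_append_take (show 1 ≤ (x :: xs).length by simp)]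
    norm_num

theorem foldl_const_iterate {α β : Type} (f : α → α) (l : List β) (x : α) :
    l.foldl (fun a _ => f a) x = f^[l.length] x := by
  induction l generalizing x with
  | nil => rfl
  | cons y ys ih => simp [List.foldl_cons, ih, Function.iterate_succ_apply]

theorem iterate_rotation (n : Nat) (l : List Int) :
    pvRotation^[n] l = l.rotate n := by
  induction n with
  | zero => simp
  | succ k ih =>
    rw [Function.iterate_succ_apply', ih, pvRotation_eq_rotate, List.rotate_rotate]

theorem portA_eq_map (m : List (List Int)) :
    byte_shift_4_4_matrix m = (List.range m.length).map (fun k => (m.getD k []).rotate k) := by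
  unfold byte_shift_4_4_matrix
  rw [PySem.List.foldl_append_singleton_eq_map, PySem.List.pyRange_zero_nat, List.map_map]
  apply List.map_congr_left
  intro k _
  simp only [Function.comp_apply, PySem.List.pyGetD_natCast,
    foldl_const_iterate, PySem.List.length_pyRange_one]
  rw [iterate_rotation]
  norm_num

theorem portB_eq_map (m : List (List Int)) :
    byte_shift_4_4_matrix_alt m = (List.range m.length).map (fun k => (m.getD k []).rotate k) := by
  unfold byte_shift_4_4_matrix_alt
  apply List.ext_getElem
  · simp [PySem.List.length_enumerate]
  · intro k h1 h2
    simp only [List.getElem_map, List.getElem_range]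
    have hk : k < m.length := by simpa [PySem.List.length_enumerate] using h1
    rw [PySem.List.getElem_enumerate]
    simp only [zero_add]
    have hrow : m[k] = m.getD k [] := by
      rw [List.getD_eq_getElem _ _ hk]
    rw [hrow]
    set row := m.getD k [] with hr
    apply List.ext_getElem
    · simp [PySem.List.length_pyRange_one]
    · intro t ht1 ht2
      have htL : t < row.length := by
        simpa [PySem.List.length_pyRange_one] using ht1
      have hmod : (t + k) % row.length < row.length := Nat.mod_lt _ (by omega)
      rw [List.getElem_map, PySem.List.getElem_pyRange_one]
      have hcast : ((0 : Int) + ↑t + ↑k) = ((t + k : Nat) : Int) := by push_cast; ring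
      rw [hcast, PySem.Int.mod_natCast, PySem.List.pyGetD_natCast,
        List.getD_eq_getElem _ _ hmod, List.getElem_rotate]

-- ===== VERDICT (by name: the statement is the Claim_ definition above) =====
theorem byte_shift_4_4_matrix_spec : Claim_equal_byte_shift_4_4_matrix := by
  intro m _
  unfold Spec_byte_shift_4_4_matrix
  rw [portA_eq_map, portB_eq_map]
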